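-- pv_equiv track=rewrite | github.com/el-hult/adventofcode2019 | day4_runner.py | moar_numbers
-- ===== SOURCE A (Python) =====
-- import operator
-- from itertools import groupby, tee, starmap
-- from typing import Literal
--
-- def pairwise(iterable):
--     "s -> (s0,s1), (s1,s2), (s2, s3), ..."
--     a, b = tee(iterable)
--     next(b, None)
--     return zip(a, b)
--
-- def has_six_digits(i: int):
--     return 100_000 <= i <= 999_999
--
-- def is_nondecreasing_sequence(i: int):
--     pairs = pairwise(str(i))
--     goes_up = starmap(operator.le, pairs)
--     nondecreasing = all(goes_up)
--     return nondecreasing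
--
-- def one_pair_is_not_triplet(i: int):
--     return 2 in {sum(1 for _ in g) for _, g in groupby(str(i))}
--
-- def has_pair(i: int):
--     pairs = pairwise(str(i))
--     is_equal = starmap(operator.eq, pairs)
--     return any(is_equal)
--
-- def moar_numbers(start_inclusive, stop_inclusive, part=Literal['a', 'b']):
--     current = start_inclusive
--     check_extra = part == 'b'
--     while current <= stop_inclusive:
--         current_fulfils_spec = (
--                 has_six_digits(current) and
--                 is_nondecreasing_sequence(current) and
--                 has_pair(current) and
--                 (not check_extra or one_pair_is_not_triplet(current))
--         )
--         if current_fulfils_spec: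
--             yield current
--         current += 1
-- ===== SOURCE B (Python) =====
-- from itertools import combinations_with_replacement
-- from typing import Literal
--
--
-- def moar_numbers(start_inclusive, stop_inclusive, part=Literal['a', 'b']):
--     # Enumerate the six-digit numbers with nondecreasing digits directly
--     # (combinations_with_replacement yields them in increasing numeric order)
--     # instead of scanning the whole integer range.
--     check_extra = part == 'b'
--     for digits in combinations_with_replacement(range(1, 10), 6):
--         n = 0
--         for d in digits:
--             n = n * 10 + d
--         if n < start_inclusive or n > stop_inclusive:
--             continue
--         distinct = set(digits)
--         if len(distinct) == 6:
--             continue  # all digits different: no adjacent pair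
--         if check_extra and not any(digits.count(d) == 2 for d in distinct):
--             continue
--         yield n
-- ===== Notes on version B (the rewrite author's own statement) =====
-- stated objective: alternative
-- what changed: Instead of scanning every integer in [start, stop] and testing each, B enumerates the 3003 nondecreasing six-digit combinations via itertools.combinations_with_replacement (which yields them in increasing numeric order) and filters by range and the pair conditions; cost is independent of the range size, a trade against A's per-integer scan.
import Mathlib
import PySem

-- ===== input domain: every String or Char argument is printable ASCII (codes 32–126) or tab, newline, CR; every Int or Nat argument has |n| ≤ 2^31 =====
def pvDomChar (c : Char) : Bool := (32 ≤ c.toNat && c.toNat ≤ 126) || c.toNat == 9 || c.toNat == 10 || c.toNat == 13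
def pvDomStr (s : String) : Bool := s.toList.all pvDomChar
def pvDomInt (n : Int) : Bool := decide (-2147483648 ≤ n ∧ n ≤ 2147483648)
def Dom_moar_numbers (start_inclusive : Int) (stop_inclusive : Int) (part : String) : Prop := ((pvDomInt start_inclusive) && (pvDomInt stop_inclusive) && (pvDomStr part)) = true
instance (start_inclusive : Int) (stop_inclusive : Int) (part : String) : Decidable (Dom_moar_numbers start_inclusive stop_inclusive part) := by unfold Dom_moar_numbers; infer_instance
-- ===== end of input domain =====

-- B replaces A's scan of every integer in [start, stop] by a direct enumeration of the 3003
-- nondecreasing six-digit combinations, filtered by range and the pair conditions; both are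
-- generators, compared by the list of yielded values.

-- ===== PORT A =====
-- pairwise(str(i)): adjacent character pairs of str(i)
def pyPairwiseChars (cs : List Char) : List (Char × Char) := cs.zip cs.tail

def has_six_digits (i : Int) : Bool := decide (100000 ≤ i ∧ i ≤ 999999)

def is_nondecreasing_sequence (i : Int) : Bool :=
  (pyPairwiseChars (PySem.Int.toChars i)).all fun p => decide (p.1 ≤ p.2)

-- groupby(str(i)): lengths of the maximal runs of equal characters
def runLengthsAux (c : Char) (n : Int) : List Char → List Int
  | [] => [n]
  | d :: rest => if d == c then runLengthsAux c (n + 1) rest else n :: runLengthsAux d 1 rest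

def runLengths : List Char → List Int
  | [] => []
  | c :: rest => runLengthsAux c 1 rest

-- 2 in {sum(1 for _ in g) for _, g in groupby(str(i))}
def one_pair_is_not_triplet (i : Int) : Bool :=
  (PySem.Set.ofList (runLengths (PySem.Int.toChars i))).contains 2

def has_pair (i : Int) : Bool :=
  (pyPairwiseChars (PySem.Int.toChars i)).any fun p => p.1 == p.2

-- current_fulfils_spec in A's loop body
def pvFulfils (check_extra : Bool) (current : Int) : Bool :=
  has_six_digits current && is_nondecreasing_sequence current && has_pair current &&
    (!check_extra || one_pair_is_not_triplet current)

-- the while-loop: current counts up from start to stop, appending to the yielded list when the spec holds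
def moarLoop (stop_inclusive : Int) (check_extra : Bool) (current : Int) (acc : List Int) : List Int :=
  if current ≤ stop_inclusive then
    moarLoop stop_inclusive check_extra (current + 1)
      (if pvFulfils check_extra current then acc ++ [current] else acc)
  else acc
termination_by (stop_inclusive + 1 - current).toNat
decreasing_by omega

def moar_numbers (start_inclusive : Int) (stop_inclusive : Int) (part : String) : List Int :=
  moarLoop stop_inclusive (part == "b") start_inclusive []

-- ===== PORT B =====
-- itertools.combinations_with_replacement(pool, r), in CPython's lexicographic order:
-- tuples starting at pool[i] come before those starting at pool[j] for i < j
def cwr : Nat → List Int → List (List Int)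
  | 0, _ => [[]]
  | r + 1, xs =>
    xs.tails.flatMap fun s =>
      match s with
      | [] => []
      | x :: rest => (cwr r (x :: rest)).map (x :: ·)

def moar_numbers_alt (start_inclusive : Int) (stop_inclusive : Int) (part : String) : List Int :=
  let check_extra := part == "b"
  (cwr 6 (PySem.List.pyRange 1 10 1)).flatMap fun digits =>
    let n := digits.foldl (fun a d => a * 10 + d) 0
    if n < start_inclusive ∨ stop_inclusive < n then []
    else
      let distinct := PySem.Set.ofList digits
      if distinct.length == 6 then []
      else if check_extra && !(distinct.any fun d => PySem.List.count digits d == 2) then []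
      else [n]

-- ===== PRECONDITION & SPEC =====
def Spec_moar_numbers (start_inclusive : Int) (stop_inclusive : Int) (part : String) (out : List Int) : Prop := out = moar_numbers_alt start_inclusive stop_inclusive part
instance (start_inclusive : Int) (stop_inclusive : Int) (part : String) (out : List Int) : Decidable (Spec_moar_numbers start_inclusive stop_inclusive part out) := by unfold Spec_moar_numbers; infer_instance

-- ===== CLAIM (what is proved, stated in full; the proofs are below) =====
def Claim_equal_moar_numbers : Prop := ∀ (start_inclusive : Int) (stop_inclusive : Int) (part : String), Dom_moar_numbers start_inclusive stop_inclusive part → Spec_moar_numbers start_inclusive stop_inclusive part (moar_numbers start_inclusive stop_inclusive part)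

-- ===== LEMMAS AND PROOFS =====

-- proof-side abbreviations
def pvPool : List Int := PySem.List.pyRange 1 10 1

def pvNumOf (ds : List Int) : Int := ds.foldl (fun a d => a * 10 + d) 0

def pvSpecB (ce : Bool) (ds : List Int) : Bool :=
  !((PySem.Set.ofList ds).length == 6) &&
    (!ce || (PySem.Set.ofList ds).any fun d => PySem.List.count ds d == 2)

def pvCandB (ce : Bool) : List Int := ((cwr 6 pvPool).filter (pvSpecB ce)).map pvNumOf

def pvChainLt (l : List Int) : Bool := (l.zip l.tail).all fun p => decide (p.1 < p.2)


def pvDigits (n : Nat) : List Char :=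
  if h : n < 10 then [Nat.digitChar n]
  else pvDigits (n / 10) ++ [Nat.digitChar (n % 10)]
termination_by n
decreasing_by exact Nat.div_lt_self (by omega) (by omega)

theorem toDigitsCore_eq : ∀ (fuel n : Nat) (ds : List Char), 0 < fuel → n < 10 ^ fuel →
    Nat.toDigitsCore 10 fuel n ds = pvDigits n ++ ds := by
  intro fuel
  induction fuel with
  | zero => omega
  | succ f ih =>
    intro n ds _ hlt
    rw [Nat.toDigitsCore]
    by_cases h10 : n < 10
    · have h0 : n / 10 = 0 := Nat.div_eq_of_lt h10
      simp [h0, pvDigits, h10, Nat.mod_eq_of_lt h10]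
    · have h0 : ¬ n / 10 = 0 := by omega
      have hf : 0 < f := by
        by_contra hc
        have : f = 0 := by omega
        subst this
        simp [pow_succ, pow_zero] at hlt
        omega
      have hb : n / 10 < 10 ^ f := by
        rw [Nat.div_lt_iff_lt_mul (by norm_num)]
        calc n < 10 ^ (f + 1) := hlt
        _ = 10 ^ f * 10 := by ring
      simp only [if_neg h0]
      rw [ih (n / 10) _ hf hb]
      rw [show pvDigits n = pvDigits (n / 10) ++ [Nat.digitChar (n % 10)] from by
        rw [pvDigits]; rw [dif_neg h10]]
      simp

theorem toChars_eq (n : Int) (h : 0 ≤ n) : PySem.Int.toChars n = pvDigits n.toNat := by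
  rw [PySem.Int.toChars, if_neg (by omega)]
  rw [Nat.toDigits]
  rw [toDigitsCore_eq _ _ _ (Nat.succ_pos _)
    (lt_of_lt_of_le (Nat.lt_pow_self (by norm_num)) (Nat.pow_le_pow_right (by norm_num) (Nat.le_succ _)))]
  simp

theorem pvDigits_six (m : Nat) (h1 : 100000 ≤ m) (h2 : m < 1000000) :
    pvDigits m = [Nat.digitChar (m / 100000), Nat.digitChar (m / 10000 % 10),
      Nat.digitChar (m / 1000 % 10), Nat.digitChar (m / 100 % 10),
      Nat.digitChar (m / 10 % 10), Nat.digitChar (m % 10)] := by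
  rw [pvDigits]; rw [dif_neg (by omega)]
  rw [pvDigits]; rw [dif_neg (by omega)]
  rw [pvDigits]; rw [dif_neg (by omega)]
  rw [pvDigits]; rw [dif_neg (by omega)]
  rw [pvDigits]; rw [dif_neg (by omega)]
  rw [pvDigits]; rw [dif_pos (by omega)]
  norm_num [Nat.div_div_eq_div_mul]

theorem digitChar_le_iff (a b : Nat) (ha : a < 10) (hb : b < 10) :
    (Nat.digitChar a ≤ Nat.digitChar b) ↔ a ≤ b := by
  interval_cases a <;> interval_cases b <;> decide

theorem cwr_succ_cons (r : Nat) (x : Int) (rest : List Int) :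
    cwr (r + 1) (x :: rest) = ((cwr r (x :: rest)).map (x :: ·)) ++ cwr (r + 1) rest := by
  conv_lhs => rw [cwr]
  rw [List.tails_cons, List.flatMap_cons]
  rfl

theorem mem_cwr_of : ∀ (r : Nat) (c xs : List Int), xs.Pairwise (· < ·) → c.length = r →
    c.Pairwise (· ≤ ·) → (∀ e ∈ c, e ∈ xs) → c ∈ cwr r xs := by
  intro r
  induction r with
  | zero =>
    intro c xs _ hlen _ _
    rw [List.length_eq_zero_iff] at hlen
    subst hlen
    simp [cwr]
  | succ r ih =>
    intro c xs hxs hlen hc hmem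
    cases c with
    | nil => simp at hlen
    | cons e c' =>
      induction xs with
      | nil => exact absurd (hmem e (by simp)) (by simp)
      | cons x rest ihx =>
        rw [cwr_succ_cons, List.mem_append]
        by_cases hex : e = x
        · subst hex
          left
          rw [List.mem_map]
          refine ⟨c', ih c' (e :: rest) hxs (by simpa using hlen) (hc.sublist (List.sublist_cons_self _ _)) ?_, rfl⟩
          intro m hm
          exact hmem m (List.mem_cons_of_mem _ hm)
        · right
          have hxlt : ∀ m ∈ (e :: c'), x < m := by
            intro m hm
            have hmx : m ∈ x :: rest := hmem m hm
            have hex' : e ∈ rest := by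
              have := hmem e (by simp)
              rcases List.mem_cons.mp this with h | h
              · exact absurd h hex
              · exact h
            have hxe : x < e := List.rel_of_pairwise_cons hxs hex'
            rcases List.mem_cons.mp hm with rfl | hm'
            · exact hxe
            · exact lt_of_lt_of_le hxe (List.rel_of_pairwise_cons hc hm')
          apply ihx (List.Pairwise.sublist (List.sublist_cons_self _ _) hxs)
          intro m hm
          have := hmem m hm
          rcases List.mem_cons.mp this with rfl | hm'
          · exact absurd rfl (ne_of_gt (hxlt m hm)).symm
          · exact hm'


-- A's loop is the filter of the integer range by its body's test
theorem moarLoop_eq_filter (stop : Int) (ce : Bool) (cur : Int) (acc : List Int) :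
    moarLoop stop ce cur acc = acc ++ (PySem.List.pyRange cur (stop + 1) 1).filter (pvFulfils ce) := by
  fun_induction moarLoop stop ce cur acc with
  | case1 cur acc h ih =>
    rw [PySem.List.pyRange_one_cons (by omega), List.filter_cons]
    cases hf : pvFulfils ce cur <;> simp [hf] at ih <;> simp [hf, ih]
  | case2 cur acc h =>
    rw [PySem.List.pyRange_one_eq_nil (by omega)]
    simp

-- B's flatMap is the range-filter of the candidate list
theorem body_elem (s t : Int) (ce : Bool) (d : List Int) :
    (let n := d.foldl (fun a d => a * 10 + d) 0
     if n < s ∨ t < n then []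
     else
       let distinct := PySem.Set.ofList d
       if distinct.length == 6 then []
       else if ce && !(distinct.any fun x => PySem.List.count d x == 2) then []
       else [n]) =
    (if pvSpecB ce d then
      (if s ≤ pvNumOf d ∧ pvNumOf d ≤ t then [pvNumOf d] else []) else []) := by
  show (if d.foldl (fun a d => a * 10 + d) 0 < s ∨ t < d.foldl (fun a d => a * 10 + d) 0 then _ else _) = _
  by_cases hr : d.foldl (fun a d => a * 10 + d) 0 < s ∨ t < d.foldl (fun a d => a * 10 + d) 0
  · have hnr : ¬(s ≤ pvNumOf d ∧ pvNumOf d ≤ t) := by simp only [pvNumOf]; omega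
    simp [hr, hnr]
  · have hnr : s ≤ d.foldl (fun a d => a * 10 + d) 0 ∧ d.foldl (fun a d => a * 10 + d) 0 ≤ t := by
      omega
    cases h6 : ((PySem.Set.ofList d).length == 6)
    · cases ce
      · simp only [if_neg hr, h6, pvSpecB, pvNumOf]
        simp [hnr]
      · cases hany : ((PySem.Set.ofList d).any fun x => PySem.List.count d x == 2)
        · simp only [if_neg hr, h6, hany, pvSpecB, pvNumOf]
          simp
        · simp only [if_neg hr, h6, hany, pvSpecB, pvNumOf]
          simp [hnr]
    · simp only [if_neg hr, h6, pvSpecB, pvNumOf]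
      simp

theorem flatMap_body_eq (s t : Int) (ce : Bool) : ∀ L : List (List Int),
    (L.flatMap fun digits =>
      let n := digits.foldl (fun a d => a * 10 + d) 0
      if n < s ∨ t < n then []
      else
        let distinct := PySem.Set.ofList digits
        if distinct.length == 6 then []
        else if ce && !(distinct.any fun d => PySem.List.count digits d == 2) then []
        else [n]) =
      ((L.filter (pvSpecB ce)).map pvNumOf).filter fun n => decide (s ≤ n ∧ n ≤ t) := by
  intro L
  induction L with
  | nil => rfl
  | cons d L ih =>
    rw [List.flatMap_cons, List.filter_cons, ih, body_elem s t ce d]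
    cases hs : pvSpecB ce d
    · simp
    · simp only [if_pos rfl, List.map_cons, List.filter_cons]
      by_cases hin : s ≤ pvNumOf d ∧ pvNumOf d ≤ t <;> simp [hin]

theorem alt_eq_filter (s t : Int) (p : String) :
    moar_numbers_alt s t p =
      (pvCandB (p == "b")).filter fun n => decide (s ≤ n ∧ n ≤ t) := by
  rw [moar_numbers_alt, pvCandB]
  exact flatMap_body_eq s t (p == "b") (cwr 6 pvPool)

-- the 3003 candidates, checked one by one: A's test at the candidate's value is B's test
set_option maxRecDepth 100000 in
set_option maxHeartbeats 4000000 in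
theorem all_spec : ((cwr 6 pvPool).all fun ds =>
    (pvFulfils true (pvNumOf ds) == pvSpecB true ds) &&
    (pvFulfils false (pvNumOf ds) == pvSpecB false ds)) = true := by decide

-- B's candidate values are strictly increasing
set_option maxRecDepth 100000 in
set_option maxHeartbeats 4000000 in
theorem chain_candB_t : pvChainLt (pvCandB true) = true := by decide

set_option maxRecDepth 100000 in
set_option maxHeartbeats 4000000 in
theorem chain_candB_f : pvChainLt (pvCandB false) = true := by decide

theorem pairwise_of_chainLt : ∀ l : List Int, pvChainLt l = true → l.Pairwise (· < ·) := by
  intro l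
  induction l with
  | nil => intro; exact List.Pairwise.nil
  | cons a t ih =>
    cases t with
    | nil => intro; simp
    | cons b t' =>
      intro h
      simp only [pvChainLt, List.tail_cons, List.zip_cons_cons, List.all_cons,
        Bool.and_eq_true, decide_eq_true_eq] at h
      obtain ⟨hab, hrest⟩ := h
      have hp := ih (by simpa [pvChainLt] using hrest)
      refine List.Pairwise.cons ?_ hp
      intro x hx
      rcases List.mem_cons.mp hx with rfl | hx'
      · exact hab
      · exact lt_trans hab (List.rel_of_pairwise_cons hp hx')

theorem eq_of_sorted_mem : ∀ l₁ l₂ : List Int, l₁.Pairwise (· < ·) → l₂.Pairwise (· < ·) →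
    (∀ n, n ∈ l₁ ↔ n ∈ l₂) → l₁ = l₂ := by
  intro l₁ l₂ h₁ h₂ hmem
  have hperm : l₁.Perm l₂ := (List.perm_ext_iff_of_nodup h₁.nodup h₂.nodup).mpr hmem
  exact List.Perm.eq_of_pairwise (fun a b _ _ h h' => le_antisymm h h')
    (h₁.imp le_of_lt) (h₂.imp le_of_lt) hperm

theorem fulfils_eq_specB (ce : Bool) (ds : List Int) (h : ds ∈ cwr 6 pvPool) :
    pvFulfils ce (pvNumOf ds) = pvSpecB ce ds := by
  have := List.all_eq_true.mp all_spec ds h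
  simp only [Bool.and_eq_true, beq_iff_eq] at this
  cases ce
  · exact this.2
  · exact this.1

theorem pvHornerNat (m : Nat) : (m / 100000) * 100000 + (m / 10000 % 10) * 10000 +
    (m / 1000 % 10) * 1000 + (m / 100 % 10) * 100 + (m / 10 % 10) * 10 + m % 10 = m := by
  omega

theorem fulfils_iff_mem_candB (ce : Bool) (n : Int) :
    pvFulfils ce n = true ↔ n ∈ pvCandB ce := by
  constructor
  · intro h
    have hparts := h
    simp only [pvFulfils, Bool.and_eq_true] at hparts
    have h6 : 100000 ≤ n ∧ n ≤ 999999 := by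
      have := hparts.1.1.1
      simpa [has_six_digits] using this
    have hnd : is_nondecreasing_sequence n = true := hparts.1.1.2
    obtain ⟨m, rfl⟩ : ∃ m : Nat, n = (m : Int) := ⟨n.toNat, by omega⟩
    have hm1 : 100000 ≤ m := by omega
    have hm2 : m < 1000000 := by omega
    have hexp : PySem.Int.toChars (m : Int) = [Nat.digitChar (m / 100000), Nat.digitChar (m / 10000 % 10),
        Nat.digitChar (m / 1000 % 10), Nat.digitChar (m / 100 % 10),
        Nat.digitChar (m / 10 % 10), Nat.digitChar (m % 10)] := by
      rw [toChars_eq _ (by omega), Int.toNat_natCast, pvDigits_six m hm1 hm2]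
    -- digit inequalities from the nondecreasing test
    rw [is_nondecreasing_sequence, hexp] at hnd
    simp only [pyPairwiseChars, List.tail_cons, List.zip_cons_cons, List.zip_nil_right,
      List.all_cons, List.all_nil, Bool.and_eq_true, decide_eq_true_eq, and_true] at hnd
    obtain ⟨h12, h23, h34, h45, h56⟩ := hnd
    rw [digitChar_le_iff _ _ (by omega) (by omega)] at h12 h23 h34 h45 h56
    -- the digit list
    set ds : List Int := [((m / 100000 : Nat) : Int), ((m / 10000 % 10 : Nat) : Int),
      ((m / 1000 % 10 : Nat) : Int), ((m / 100 % 10 : Nat) : Int),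
      ((m / 10 % 10 : Nat) : Int), ((m % 10 : Nat) : Int)] with hds
    have hnum : pvNumOf ds = (m : Int) := by
      simp only [hds, pvNumOf, List.foldl_cons, List.foldl_nil]
      have hN := pvHornerNat m
      have hZ : ((m / 100000 : Nat) : Int) * 100000 + ((m / 10000 % 10 : Nat) : Int) * 10000 +
          ((m / 1000 % 10 : Nat) : Int) * 1000 + ((m / 100 % 10 : Nat) : Int) * 100 +
          ((m / 10 % 10 : Nat) : Int) * 10 + ((m % 10 : Nat) : Int) = (m : Int) := by
        exact_mod_cast hN
      linear_combination hZ
    have hmemc : ds ∈ cwr 6 pvPool := by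
      apply mem_cwr_of 6 ds pvPool (PySem.List.pairwise_lt_pyRange_one 1 10) (by simp [hds])
      · simp only [hds, List.pairwise_cons, List.mem_cons, List.not_mem_nil, or_false,
          and_true, List.Pairwise.nil]
        and_intros <;> (try intro a ha) <;>
          (try rcases ha with rfl | rfl | rfl | rfl | rfl | rfl) <;> omega
      · intro e he
        simp only [pvPool]
        rw [PySem.List.mem_pyRange_one]
        simp only [hds, List.mem_cons, List.not_mem_nil, or_false] at he
        have hd1 : 1 ≤ m / 100000 := by omega
        rcases he with rfl | rfl | rfl | rfl | rfl | rfl <;> constructor <;> omega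
    have hsB : pvSpecB ce ds = true := by rw [← fulfils_eq_specB ce ds hmemc, hnum]; exact h
    rw [pvCandB, List.mem_map]
    exact ⟨ds, List.mem_filter.mpr ⟨hmemc, hsB⟩, hnum⟩
  · intro hmem
    rw [pvCandB, List.mem_map] at hmem
    obtain ⟨ds, hds, hnum⟩ := hmem
    rw [List.mem_filter] at hds
    rw [← hnum, fulfils_eq_specB ce ds hds.1]
    exact hds.2

-- ===== VERDICT (by name: the statement is the Claim_ definition above) =====
theorem moar_numbers_spec : Claim_equal_moar_numbers := by
  intro s t p _
  unfold Spec_moar_numbers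
  rw [moar_numbers, moarLoop_eq_filter, List.nil_append, alt_eq_filter]
  apply eq_of_sorted_mem
  · exact (PySem.List.pairwise_lt_pyRange_one s (t + 1)).filter _
  · refine (pairwise_of_chainLt _ ?_).filter _
    cases h : (p == "b")
    · exact chain_candB_f
    · exact chain_candB_t
  · intro n
    simp only [List.mem_filter, PySem.List.mem_pyRange_one, decide_eq_true_eq,
      fulfils_iff_mem_candB]
    constructor
    · rintro ⟨⟨h1, h2⟩, h3⟩; exact ⟨h3, by omega⟩
    · rintro ⟨h3, h1, h2⟩; exact ⟨⟨h1, by omega⟩, h3⟩
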